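-- pv_equiv track=rewrite | github.com/Gabe-Kisler/chess_game | app/utils.py | get_diagonal_squares_backward
-- ===== SOURCE A (Python) =====
-- columns = ['a', 'b', 'c', 'd', 'e', 'f', 'g', 'h']
--
-- def get_diagonal_squares_backward (square_id, num):
--     row = int(square_id[0])
--     column = square_id[1]
--     column_index = columns.index(column)
--
--     backward_right_diagonal_squares = []
--     backward_left_diagonal_squares = []
--     # right
--     for i in range (1, num + 1):
--         new_row = row - i
--         new_column_index = column_index + i
--         if new_row < 1 or new_column_index > 7:
--             break
--         new_column = columns[new_column_index]
--         square = f"{new_row}{new_column}"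
--         backward_right_diagonal_squares.append (square)
--
--     #left
--     for i in range (1, num + 1):
--         new_row = row - i
--         new_column_index = column_index - i
--         if new_row < 1 or new_column_index < 0:
--             break
--         new_column = columns[new_column_index]
--         square = f"{new_row}{new_column}"
--         backward_left_diagonal_squares.append (square)
--
--     return backward_right_diagonal_squares, backward_left_diagonal_squares
-- ===== SOURCE B (Python) =====
-- columns = ['a', 'b', 'c', 'd', 'e', 'f', 'g', 'h']
--
-- def get_diagonal_squares_backward(square_id, num):
--     row = int(square_id[0])
--     column_index = columns.index(square_id[1])
--     # scan the whole board (rows descending) and keep the squares that lie on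
--     # the same backward diagonal, strictly below the start and within num steps
--     board = [(r, c) for r in range(8, 0, -1) for c in range(8)]
--     right = [f"{r}{columns[c]}" for (r, c) in board
--              if r + c == row + column_index and r < row and row - r <= num]
--     left = [f"{r}{columns[c]}" for (r, c) in board
--             if c - r == column_index - row and r < row and row - r <= num]
--     return right, left
-- ===== Notes on version B (the rewrite author's own statement) =====
-- stated objective: alternative
-- what changed: B builds one 64-square board list and selects squares by the diagonal invariants (r+c constant for the right diagonal, c-r for the left) with a distance bound, instead of A's two break-terminated step loops that walk outward from the start square.
import Mathlib
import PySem

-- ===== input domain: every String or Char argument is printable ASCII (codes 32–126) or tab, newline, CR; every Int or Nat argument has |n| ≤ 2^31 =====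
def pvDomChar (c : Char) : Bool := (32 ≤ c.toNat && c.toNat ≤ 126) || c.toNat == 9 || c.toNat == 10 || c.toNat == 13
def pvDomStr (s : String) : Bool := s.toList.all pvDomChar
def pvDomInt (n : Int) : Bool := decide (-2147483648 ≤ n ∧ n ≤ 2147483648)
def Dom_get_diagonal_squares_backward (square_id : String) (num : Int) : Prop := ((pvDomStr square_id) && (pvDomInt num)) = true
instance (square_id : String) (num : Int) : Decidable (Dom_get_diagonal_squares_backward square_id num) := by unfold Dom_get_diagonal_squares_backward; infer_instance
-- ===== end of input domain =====

-- B replaces A's two break-terminated step loops by a single whole-board scan that keeps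
-- the squares satisfying the diagonal invariants r+c resp. c-r (objective: alternative).

-- ===== PORT A =====
-- module constant `columns` (a list of one-character strings, held as chars)
def pvColumns : List Char := ['a', 'b', 'c', 'd', 'e', 'f', 'g', 'h']

-- `for i in range(1, num+1): … if …: break … append` — fuel = number of range elements
def pvRightLoopA (row ci : Int) : Nat → Int → List String
  | 0, _ => []
  | fuel + 1, i =>
    let new_row := row - i
    let new_column_index := ci + i
    if new_row < 1 ∨ new_column_index > 7 then []
    else String.ofList (PySem.Int.toChars new_row ++ [PySem.List.pyGetD pvColumns new_column_index ' '])
           :: pvRightLoopA row ci fuel (i + 1)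

def pvLeftLoopA (row ci : Int) : Nat → Int → List String
  | 0, _ => []
  | fuel + 1, i =>
    let new_row := row - i
    let new_column_index := ci - i
    if new_row < 1 ∨ new_column_index < 0 then []
    else String.ofList (PySem.Int.toChars new_row ++ [PySem.List.pyGetD pvColumns new_column_index ' '])
           :: pvLeftLoopA row ci fuel (i + 1)

def get_diagonal_squares_backward (square_id : String) (num : Int) : List String × List String :=
  let row : Int := (PySem.Int.ofChars? [(PySem.Str.pyGet? square_id 0).getD ' ']).getD 0
  let column : Char := (PySem.Str.pyGet? square_id 1).getD ' '
  let column_index : Int := ((PySem.List.index? pvColumns column).getD 0 : Nat)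
  (pvRightLoopA row column_index num.toNat 1, pvLeftLoopA row column_index num.toNat 1)

-- ===== PORT B =====
-- the 64 board squares, rows descending (range(8,0,-1)), columns ascending (range(8))
def pvBoard : List (Int × Int) :=
  (PySem.List.pyRange 8 0 (-1)).flatMap (fun r => (PySem.List.pyRange 0 8 1).map (fun c => (r, c)))

def get_diagonal_squares_backward_alt (square_id : String) (num : Int) : List String × List String :=
  let row : Int := (PySem.Int.ofChars? [(PySem.Str.pyGet? square_id 0).getD ' ']).getD 0
  let ci : Int := ((PySem.List.index? pvColumns ((PySem.Str.pyGet? square_id 1).getD ' ')).getD 0 : Nat)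
  ((pvBoard.filter (fun rc => rc.1 + rc.2 == row + ci && decide (rc.1 < row) && decide (row - rc.1 ≤ num))).map
      (fun rc => String.ofList (PySem.Int.toChars rc.1 ++ [PySem.List.pyGetD pvColumns rc.2 ' '])),
   (pvBoard.filter (fun rc => rc.2 - rc.1 == ci - row && decide (rc.1 < row) && decide (row - rc.1 ≤ num))).map
      (fun rc => String.ofList (PySem.Int.toChars rc.1 ++ [PySem.List.pyGetD pvColumns rc.2 ' '])))

-- ===== PRECONDITION & SPEC =====
-- Pre_ = exactly where Python A returns: square_id needs a digit first character (else int()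
-- raises ValueError) and a second character among the column letters (else ValueError).
def Pre_get_diagonal_squares_backward (square_id : String) (num : Int) : Prop :=
  2 ≤ PySem.Str.len square_id ∧
  (PySem.Str.pyGet? square_id 0).getD ' ' ∈ (['0','1','2','3','4','5','6','7','8','9'] : List Char) ∧
  (PySem.Str.pyGet? square_id 1).getD ' ' ∈ pvColumns
instance (square_id : String) (num : Int) : Decidable (Pre_get_diagonal_squares_backward square_id num) := by unfold Pre_get_diagonal_squares_backward; infer_instance

def pvWitness_get_diagonal_squares_backward : String × Int := ("4d", 3)

def Spec_get_diagonal_squares_backward (square_id : String) (num : Int) (out : List String × List String) : Prop := out = get_diagonal_squares_backward_alt square_id num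
instance (square_id : String) (num : Int) (out : List String × List String) : Decidable (Spec_get_diagonal_squares_backward square_id num out) := by unfold Spec_get_diagonal_squares_backward; infer_instance

-- ===== CLAIM (what is proved, stated in full; the proofs are below) =====
def Claim_equal_get_diagonal_squares_backward : Prop := ∀ (square_id : String) (num : Int), Dom_get_diagonal_squares_backward square_id num → Pre_get_diagonal_squares_backward square_id num → Spec_get_diagonal_squares_backward square_id num (get_diagonal_squares_backward square_id num)

-- ===== LEMMAS AND PROOFS =====

-- the A-side and B-side computations as functions of the extracted row / column index
def pvCoreA (row ci num : Int) : List String × List String :=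
  (pvRightLoopA row ci num.toNat 1, pvLeftLoopA row ci num.toNat 1)

def pvCoreB (row ci num : Int) : List String × List String :=
  ((pvBoard.filter (fun rc => rc.1 + rc.2 == row + ci && decide (rc.1 < row) && decide (row - rc.1 ≤ num))).map
      (fun rc => String.ofList (PySem.Int.toChars rc.1 ++ [PySem.List.pyGetD pvColumns rc.2 ' '])),
   (pvBoard.filter (fun rc => rc.2 - rc.1 == ci - row && decide (rc.1 < row) && decide (row - rc.1 ≤ num))).map
      (fun rc => String.ofList (PySem.Int.toChars rc.1 ++ [PySem.List.pyGetD pvColumns rc.2 ' '])))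

-- A's right loop, started at i with `fuel` remaining iterations, is the map over the
-- range cut off at the break bound min (row-1) (7-ci).
lemma pvRightLoopA_eq (row ci : Int) (fuel : Nat) (i : Int) :
    pvRightLoopA row ci fuel i =
      (PySem.List.pyRange i (min (i + fuel) (min (row - 1) (7 - ci) + 1)) 1).map (fun j =>
        String.ofList (PySem.Int.toChars (row - j) ++ [PySem.List.pyGetD pvColumns (ci + j) ' '])) := by
  induction fuel generalizing i with
  | zero =>
    rw [PySem.List.pyRange_one_eq_nil (by push_cast; omega)]
    simp [pvRightLoopA]
  | succ fuel ih =>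
    by_cases h : row - i < 1 ∨ ci + i > 7
    · rw [PySem.List.pyRange_one_eq_nil (by omega)]
      simp only [pvRightLoopA, if_pos h, List.map_nil]
    · rw [PySem.List.pyRange_one_cons (by push_cast; omega)]
      simp only [pvRightLoopA, if_neg h, List.map_cons, List.cons.injEq, true_and]
      rw [ih (i + 1)]
      congr 2
      push_cast
      omega

lemma pvLeftLoopA_eq (row ci : Int) (fuel : Nat) (i : Int) :
    pvLeftLoopA row ci fuel i =
      (PySem.List.pyRange i (min (i + fuel) (min (row - 1) ci + 1)) 1).map (fun j =>
        String.ofList (PySem.Int.toChars (row - j) ++ [PySem.List.pyGetD pvColumns (ci - j) ' '])) := by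
  induction fuel generalizing i with
  | zero =>
    rw [PySem.List.pyRange_one_eq_nil (by push_cast; omega)]
    simp [pvLeftLoopA]
  | succ fuel ih =>
    by_cases h : row - i < 1 ∨ ci - i < 0
    · rw [PySem.List.pyRange_one_eq_nil (by omega)]
      simp only [pvLeftLoopA, if_pos h, List.map_nil]
    · rw [PySem.List.pyRange_one_cons (by push_cast; omega)]
      simp only [pvLeftLoopA, if_neg h, List.map_cons, List.cons.injEq, true_and]
      rw [ih (i + 1)]
      congr 2
      push_cast
      omega

-- num only matters through the clamped value max 0 (min num 9) on the A side …
lemma bound_clamp (num K : Int) (hK : K ≤ 8) :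
    min (1 + (num.toNat : Int)) (K + 1) = min (1 + ((max 0 (min num 9)).toNat : Int)) (K + 1) := by
  omega

lemma coreA_clamp (row ci num : Int) (hc0 : 0 ≤ ci) (hc7 : ci ≤ 7) :
    pvCoreA row ci num = pvCoreA row ci (max 0 (min num 9)) := by
  unfold pvCoreA
  rw [pvRightLoopA_eq, pvRightLoopA_eq, pvLeftLoopA_eq, pvLeftLoopA_eq]
  rw [bound_clamp num (min (row - 1) (7 - ci)) (by omega),
      bound_clamp num (min (row - 1) ci) (by omega)]

-- every board square has a row index in 1..8
lemma pvBoard_row_bounds : ∀ rc ∈ pvBoard, 1 ≤ rc.1 ∧ rc.1 ≤ 8 := by decide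

-- … and on the B side
lemma coreB_clamp (row ci num : Int) (h9 : row ≤ 9) :
    pvCoreB row ci num = pvCoreB row ci (max 0 (min num 9)) := by
  unfold pvCoreB
  congr 1 <;>
  · congr 1
    apply List.filter_congr
    intro rc hrc
    have hb := pvBoard_row_bounds rc hrc
    by_cases hlt : rc.1 < row
    · have : decide (row - rc.1 ≤ num) = decide (row - rc.1 ≤ max 0 (min num 9)) :=
        decide_eq_decide.mpr (by omega)
      rw [this]
    · simp [hlt]

lemma main_clamped (row ci m : Int) (h0 : 0 ≤ row) (h9 : row ≤ 9)
    (hc0 : 0 ≤ ci) (hc7 : ci ≤ 7) (hm0 : 0 ≤ m) (hm9 : m ≤ 9) :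
    pvCoreA row ci m = pvCoreB row ci m := by
  interval_cases row <;> interval_cases ci <;> interval_cases m <;> decide

lemma main_lemma (row ci num : Int) (h0 : 0 ≤ row) (h9 : row ≤ 9)
    (hc0 : 0 ≤ ci) (hc7 : ci ≤ 7) :
    pvCoreA row ci num = pvCoreB row ci num := by
  rw [coreA_clamp row ci num hc0 hc7, coreB_clamp row ci num h9]
  exact main_clamped row ci _ h0 h9 hc0 hc7 (by omega) (by omega)

lemma row_bounds (c : Char) (h : c ∈ (['0','1','2','3','4','5','6','7','8','9'] : List Char)) :
    0 ≤ (PySem.Int.ofChars? [c]).getD 0 ∧ (PySem.Int.ofChars? [c]).getD 0 ≤ 9 := by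
  fin_cases h <;> decide

lemma ci_bounds (c : Char) (h : c ∈ pvColumns) :
    (((PySem.List.index? pvColumns c).getD 0 : Nat) : Int) ≤ 7 := by
  fin_cases h <;> decide

-- ===== VERDICT (by name: the statement is the Claim_ definition above) =====
theorem get_diagonal_squares_backward_spec : Claim_equal_get_diagonal_squares_backward := by
  intro square_id num _hd hp
  obtain ⟨-, h0, h1⟩ := hp
  have hr := row_bounds _ h0
  have hc := ci_bounds _ h1
  show pvCoreA ((PySem.Int.ofChars? [(PySem.Str.pyGet? square_id 0).getD ' ']).getD 0)
        (((PySem.List.index? pvColumns ((PySem.Str.pyGet? square_id 1).getD ' ')).getD 0 : Nat) : Int) num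
      = pvCoreB ((PySem.Int.ofChars? [(PySem.Str.pyGet? square_id 0).getD ' ']).getD 0)
        (((PySem.List.index? pvColumns ((PySem.Str.pyGet? square_id 1).getD ' ')).getD 0 : Nat) : Int) num
  exact main_lemma _ _ _ hr.1 hr.2 (Int.natCast_nonneg _) hc
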